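-- pv_equiv track=rewrite | github.com/Kvkthecreator/rightnow-agent-app-fullstack | api/src/app/agents/pipeline/presentation_agent.py | _compose_standard_narrative
-- ===== SOURCE A (Python) =====
-- from typing import Dict, Any, List, Optional
--
-- def _compose_standard_narrative(
--
--     blocks: List[Dict[str, Any]],
--     context_items: List[Dict[str, Any]],
--     narrative_prompt: Optional[str]
-- ) -> str:
--     """Compose a standard narrative from substrate."""
--     parts = []
--
--     # Introduction
--     if narrative_prompt:
--         parts.append(narrative_prompt)
--         parts.append("")
--
--     parts.append(f"This narrative synthesizes insights from {len(blocks)} structured elements and {len(context_items)} contextual pieces.")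
--
--     # Main narrative flow
--     if blocks:
--         parts.append("\n## Core Insights")
--
--         # Group by semantic type for narrative flow
--         goals = [b for b in blocks if b.get("semantic_type") == "goal"]
--         problems = [b for b in blocks if b.get("semantic_type") == "problem"]
--         solutions = [b for b in blocks if b.get("semantic_type") == "solution"]
--         insights = [b for b in blocks if b.get("semantic_type") == "insight"]
--         other_blocks = [b for b in blocks if b.get("semantic_type") not in ["goal", "problem", "solution", "insight"]]
--
--         # Goals narrative
--         if goals:
--             parts.append("\n### Objectives & Goals")
--             for goal in goals:
--                 title = goal.get("title", "Goal")
--                 content = goal.get("content", "")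
--                 if content:
--                     parts.append(f"**{title}**: {content}")
--
--         # Problems narrative
--         if problems:
--             parts.append("\n### Challenges & Issues")
--             for problem in problems:
--                 title = problem.get("title", "Challenge")
--                 content = problem.get("content", "")
--                 if content:
--                     parts.append(f"**{title}**: {content}")
--
--         # Solutions narrative
--         if solutions:
--             parts.append("\n### Solutions & Approaches")
--             for solution in solutions:
--                 title = solution.get("title", "Solution")
--                 content = solution.get("content", "")
--                 if content:
--                     parts.append(f"**{title}**: {content}")
--
--         # Insights narrative
--         if insights:
--             parts.append("\n### Key Insights")
--             for insight in insights:
--                 title = insight.get("title", "Insight")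
--                 content = insight.get("content", "")
--                 if content:
--                     parts.append(f"**{title}**: {content}")
--
--         # Other blocks
--         if other_blocks:
--             parts.append("\n### Additional Considerations")
--             for block in other_blocks:
--                 title = block.get("title", "Note")
--                 content = block.get("content", "")
--                 if content:
--                     parts.append(f"**{title}**: {content}")
--
--     # Context integration
--     if context_items:
--         parts.append("\n## Context & Background")
--
--         # Group context by type
--         context_groups = {}
--         for item in context_items:
--             item_type = item.get("semantic_type", "concept")
--             if item_type not in context_groups:
--                 context_groups[item_type] = []
--             context_groups[item_type].append(item)
--
--         for context_type, items in context_groups.items():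
--             if items:
--                 parts.append(f"\n### {context_type.title()} Context")
--                 for item in items[:5]:  # Limit per type
--                     content = item.get("content", "")
--                     if content:
--                         parts.append(f"- {content}")
--
--     return "\n".join(parts)
-- ===== SOURCE B (Python) =====
-- from typing import Dict, Any, List, Optional
--
-- # Table-driven rewrite: one bucketing pass over blocks plus a (key, heading, default-title)
-- # table replaces the five per-category filter passes and five copy-pasted emission loops of A.
-- _SECTIONS = [
--     ("goal", "\n### Objectives & Goals", "Goal"),
--     ("problem", "\n### Challenges & Issues", "Challenge"),
--     ("solution", "\n### Solutions & Approaches", "Solution"),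
--     ("insight", "\n### Key Insights", "Insight"),
--     (None, "\n### Additional Considerations", "Note"),
-- ]
--
-- def _compose_standard_narrative(
--     blocks: List[Dict[str, Any]],
--     context_items: List[Dict[str, Any]],
--     narrative_prompt: Optional[str]
-- ) -> str:
--     parts = []
--
--     if narrative_prompt:
--         parts += [narrative_prompt, ""]
--
--     parts.append(f"This narrative synthesizes insights from {len(blocks)} structured elements and {len(context_items)} contextual pieces.")
--
--     if blocks:
--         buckets = {key: [] for key, _, _ in _SECTIONS}
--         for b in blocks:
--             t = b.get("semantic_type")
--             buckets[t if t in ("goal", "problem", "solution", "insight") else None].append(b)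
--
--         parts.append("\n## Core Insights")
--         for key, heading, default_title in _SECTIONS:
--             bucket = buckets[key]
--             if bucket:
--                 parts.append(heading)
--                 parts += [f"**{b.get('title', default_title)}**: {c}"
--                           for b in bucket if (c := b.get("content", ""))]
--
--     if context_items:
--         parts.append("\n## Context & Background")
--
--         context_groups = {}
--         for item in context_items:
--             item_type = item.get("semantic_type", "concept")
--             if item_type not in context_groups:
--                 context_groups[item_type] = []
--             context_groups[item_type].append(item)
--
--         for context_type, items in context_groups.items():
--             if items:
--                 parts.append(f"\n### {context_type.title()} Context")
--                 for item in items[:5]:  # Limit per type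
--                     content = item.get("content", "")
--                     if content:
--                         parts.append(f"- {content}")
--
--     return "\n".join(parts)
-- ===== Notes on version B (the rewrite author's own statement) =====
-- stated objective: simpler
-- what changed: The five per-category filter passes over blocks and five copy-pasted emission loops are replaced by one bucketing pass into an ordered dict plus a table-driven emission loop over (key, heading, default-title) entries; intro and context sections are kept as in A.
import Mathlib
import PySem

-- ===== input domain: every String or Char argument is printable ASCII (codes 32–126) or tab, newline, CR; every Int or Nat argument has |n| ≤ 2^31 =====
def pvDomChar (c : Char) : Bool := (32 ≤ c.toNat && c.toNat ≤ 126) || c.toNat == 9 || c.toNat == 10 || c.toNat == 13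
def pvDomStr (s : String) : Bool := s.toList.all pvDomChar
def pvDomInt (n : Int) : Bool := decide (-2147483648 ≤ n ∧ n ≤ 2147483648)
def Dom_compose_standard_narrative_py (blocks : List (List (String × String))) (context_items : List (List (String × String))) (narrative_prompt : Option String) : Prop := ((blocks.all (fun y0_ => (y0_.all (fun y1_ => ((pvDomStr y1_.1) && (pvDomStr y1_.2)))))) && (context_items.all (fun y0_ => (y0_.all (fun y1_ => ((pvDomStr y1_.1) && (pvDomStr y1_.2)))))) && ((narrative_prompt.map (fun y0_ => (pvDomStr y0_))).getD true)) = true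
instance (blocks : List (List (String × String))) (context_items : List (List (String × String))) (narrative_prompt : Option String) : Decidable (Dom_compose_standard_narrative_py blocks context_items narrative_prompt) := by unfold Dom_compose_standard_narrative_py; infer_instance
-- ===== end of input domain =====

-- B replaces A's five per-category filter passes and five copy-pasted emission loops by one
-- bucketing pass over `blocks` plus a (key, heading, default-title) table; objective: simpler.

-- Shared dict primitives (Python dict.get on the association-list encoding: first match).
def pvDget (d : List (String × String)) (k : String) : Option String :=
  (d.find? (fun p => p.1 == k)).map (·.2)

def pvDgetD (d : List (String × String)) (k : String) (dflt : String) : String :=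
  (pvDget d k).getD dflt

-- Hand port of Python str.title() (PySem has none): exact on ASCII (the stated domain) —
-- a letter is uppercased after a non-letter and lowercased after a letter.
def pvIsAlpha (c : Char) : Bool := ('a' ≤ c && c ≤ 'z') || ('A' ≤ c && c ≤ 'Z')

def pvTitleChars : Bool → List Char → List Char
  | _, [] => []
  | prev, c :: cs =>
    if pvIsAlpha c then (if prev then c.toLower else c.toUpper) :: pvTitleChars true cs
    else c :: pvTitleChars false cs

def pvTitle (s : String) : String := String.ofList (pvTitleChars false s.toList)

-- The intro lines and the context-items section are textually identical in A and B (B keeps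
-- them unchanged); both ports call these shared transliterations of those chunks.
def pvIntroParts (blocks : List (List (String × String))) (context_items : List (List (String × String))) (narrative_prompt : Option String) : List String :=
  let parts : List String := []
  let parts := match narrative_prompt with
    | some np => if np ≠ "" then parts ++ [np, ""] else parts
    | none => parts
  parts ++ ["This narrative synthesizes insights from " ++ PySem.Int.toStr blocks.length ++ " structured elements and " ++ PySem.Int.toStr context_items.length ++ " contextual pieces."]

def pvCtxParts (context_items : List (List (String × String))) (parts : List String) : List String :=
  if context_items ≠ [] then
    let parts := parts ++ ["\n## Context & Background"]
    let context_groups : PySem.Dict String (List (List (String × String))) :=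
      context_items.foldl (fun d item =>
        let item_type := pvDgetD item "semantic_type" "concept"
        let d := if d.contains item_type then d else d.insert item_type []
        d.insert item_type (d.getD item_type [] ++ [item])) PySem.Dict.empty
    context_groups.items.foldl (fun ps ti =>
      if ti.2 ≠ [] then
        (ti.2.take 5).foldl (fun ps item =>
            let content := pvDgetD item "content" ""
            if content ≠ "" then ps ++ ["- " ++ content] else ps)
          (ps ++ ["\n### " ++ pvTitle ti.1 ++ " Context"])
      else ps) parts
  else parts

-- ===== PORT A =====
-- A's blocks section: five filter passes, then a copy of the emission loop per category.
def pvCoreA (blocks : List (List (String × String))) (parts : List String) : List String :=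
  if blocks ≠ [] then
    let goals := blocks.filter (fun b => pvDget b "semantic_type" == some "goal")
    let problems := blocks.filter (fun b => pvDget b "semantic_type" == some "problem")
    let solutions := blocks.filter (fun b => pvDget b "semantic_type" == some "solution")
    let insights := blocks.filter (fun b => pvDget b "semantic_type" == some "insight")
    let other_blocks := blocks.filter (fun b => !(pvDget b "semantic_type" == some "goal" || pvDget b "semantic_type" == some "problem" || pvDget b "semantic_type" == some "solution" || pvDget b "semantic_type" == some "insight"))
    let parts := parts ++ ["\n## Core Insights"]
    let parts := if goals ≠ [] then
        goals.foldl (fun ps g =>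
          let title := pvDgetD g "title" "Goal"
          let content := pvDgetD g "content" ""
          if content ≠ "" then ps ++ ["**" ++ title ++ "**: " ++ content] else ps)
          (parts ++ ["\n### Objectives & Goals"])
      else parts
    let parts := if problems ≠ [] then
        problems.foldl (fun ps p =>
          let title := pvDgetD p "title" "Challenge"
          let content := pvDgetD p "content" ""
          if content ≠ "" then ps ++ ["**" ++ title ++ "**: " ++ content] else ps)
          (parts ++ ["\n### Challenges & Issues"])
      else parts
    let parts := if solutions ≠ [] then
        solutions.foldl (fun ps s =>
          let title := pvDgetD s "title" "Solution"
          let content := pvDgetD s "content" ""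
          if content ≠ "" then ps ++ ["**" ++ title ++ "**: " ++ content] else ps)
          (parts ++ ["\n### Solutions & Approaches"])
      else parts
    let parts := if insights ≠ [] then
        insights.foldl (fun ps i =>
          let title := pvDgetD i "title" "Insight"
          let content := pvDgetD i "content" ""
          if content ≠ "" then ps ++ ["**" ++ title ++ "**: " ++ content] else ps)
          (parts ++ ["\n### Key Insights"])
      else parts
    let parts := if other_blocks ≠ [] then
        other_blocks.foldl (fun ps b =>
          let title := pvDgetD b "title" "Note"
          let content := pvDgetD b "content" ""
          if content ≠ "" then ps ++ ["**" ++ title ++ "**: " ++ content] else ps)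
          (parts ++ ["\n### Additional Considerations"])
      else parts
    parts
  else parts

def compose_standard_narrative_py (blocks : List (List (String × String))) (context_items : List (List (String × String))) (narrative_prompt : Option String) : String :=
  PySem.Str.join "\n" (pvCtxParts context_items (pvCoreA blocks (pvIntroParts blocks context_items narrative_prompt)))

-- ===== PORT B =====
-- Source B's _SECTIONS table; the `None` bucket key is `none`.
def pvSections : List (Option String × String × String) :=
  [(some "goal", "\n### Objectives & Goals", "Goal"),
   (some "problem", "\n### Challenges & Issues", "Challenge"),
   (some "solution", "\n### Solutions & Approaches", "Solution"),
   (some "insight", "\n### Key Insights", "Insight"),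
   (none, "\n### Additional Considerations", "Note")]

def pvBucketKey (b : List (String × String)) : Option String :=
  let t := pvDget b "semantic_type"
  if t == some "goal" || t == some "problem" || t == some "solution" || t == some "insight" then t
  else none

-- one element of Source B's comprehension: the "**title**: content" line, skipped when content is empty
def pvLine (dflt : String) (b : List (String × String)) : Option String :=
  let c := pvDgetD b "content" ""
  if c ≠ "" then some ("**" ++ pvDgetD b "title" dflt ++ "**: " ++ c) else none

-- B's blocks section: one bucketing pass, then a table-driven emission loop.
def pvCoreB (blocks : List (List (String × String))) (parts : List String) : List String :=
  if blocks ≠ [] then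
    let buckets : PySem.Dict (Option String) (List (List (String × String))) :=
      blocks.foldl (fun d b => d.modify (pvBucketKey b) [] (· ++ [b]))
        (PySem.Dict.ofList (pvSections.map (fun e => (e.1, ([] : List (List (String × String)))))))
    let parts := parts ++ ["\n## Core Insights"]
    pvSections.foldl (fun ps e =>
      let bucket := buckets.getD e.1 []
      if bucket ≠ [] then ps ++ [e.2.1] ++ bucket.filterMap (pvLine e.2.2) else ps) parts
  else parts

def compose_standard_narrative_py_alt (blocks : List (List (String × String))) (context_items : List (List (String × String))) (narrative_prompt : Option String) : String :=
  PySem.Str.join "\n" (pvCtxParts context_items (pvCoreB blocks (pvIntroParts blocks context_items narrative_prompt)))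

-- ===== PRECONDITION & SPEC =====
def Spec_compose_standard_narrative_py (blocks : List (List (String × String))) (context_items : List (List (String × String))) (narrative_prompt : Option String) (out : String) : Prop := out = compose_standard_narrative_py_alt blocks context_items narrative_prompt
instance (blocks : List (List (String × String))) (context_items : List (List (String × String))) (narrative_prompt : Option String) (out : String) : Decidable (Spec_compose_standard_narrative_py blocks context_items narrative_prompt out) := by unfold Spec_compose_standard_narrative_py; infer_instance

-- ===== CLAIM (what is proved, stated in full; the proofs are below) =====
def Claim_equal_compose_standard_narrative_py : Prop := ∀ (blocks : List (List (String × String))) (context_items : List (List (String × String))) (narrative_prompt : Option String), Dom_compose_standard_narrative_py blocks context_items narrative_prompt → Spec_compose_standard_narrative_py blocks context_items narrative_prompt (compose_standard_narrative_py blocks context_items narrative_prompt)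

-- ===== LEMMAS AND PROOFS =====

-- A's emission loop over a bucket equals B's filterMap comprehension appended to the start value.
lemma pv_emit_foldl (dflt : String) (l : List (List (String × String))) (init : List String) :
    l.foldl (fun ps b =>
      let title := pvDgetD b "title" dflt
      let content := pvDgetD b "content" ""
      if content ≠ "" then ps ++ ["**" ++ title ++ "**: " ++ content] else ps) init
    = init ++ l.filterMap (pvLine dflt) := by
  induction l generalizing init with
  | nil => simp
  | cons b l ih =>
    have hstep : ∀ ps : List String,
        (let title := pvDgetD b "title" dflt
         let content := pvDgetD b "content" ""
         if content ≠ "" then ps ++ ["**" ++ title ++ "**: " ++ content] else ps)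
        = ps ++ (pvLine dflt b).toList := by
      intro ps
      unfold pvLine
      by_cases h : pvDgetD b "content" "" = "" <;> simp [h]
    rw [List.foldl_cons, hstep, ih, List.filterMap_cons]
    cases hl : pvLine dflt b <;> simp [List.append_assoc]

-- The bucketing fold, read back through getD, is a filter on the bucket key.
lemma pv_bucket_getD (bs : List (List (String × String))) (d : PySem.Dict (Option String) (List (List (String × String)))) (k : Option String) :
    (bs.foldl (fun d b => d.modify (pvBucketKey b) [] (· ++ [b])) d).getD k []
    = d.getD k [] ++ bs.filter (fun b => pvBucketKey b == k) := by
  induction bs generalizing d with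
  | nil => simp
  | cons b bs ih =>
    simp only [List.foldl_cons, List.filter_cons, ih]
    rw [PySem.Dict.getD_modify]
    by_cases h : k = pvBucketKey b
    · simp [h, List.append_assoc]
    · have h' : (pvBucketKey b == k) = false := by
        simp only [beq_eq_false_iff_ne]; exact fun hh => h hh.symm
      simp [h, h']

lemma pv_key_eq_some (b : List (String × String)) (s : String)
    (hs : s = "goal" ∨ s = "problem" ∨ s = "solution" ∨ s = "insight") :
    (pvBucketKey b == some s) = (pvDget b "semantic_type" == some s) := by
  unfold pvBucketKey
  by_cases h : (pvDget b "semantic_type" == some "goal" || pvDget b "semantic_type" == some "problem" || pvDget b "semantic_type" == some "solution" || pvDget b "semantic_type" == some "insight") = true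
  · simp [h]
  · rw [if_neg (by simp [h])]
    simp only [Bool.or_eq_true, beq_iff_eq] at h
    push Not at h
    obtain ⟨⟨⟨h1, h2⟩, h3⟩, h4⟩ := h
    rcases hs with rfl | rfl | rfl | rfl <;> simp [h1, h2, h3, h4]

lemma pv_key_eq_none (b : List (String × String)) :
    (pvBucketKey b == (none : Option String))
    = (!(pvDget b "semantic_type" == some "goal" || pvDget b "semantic_type" == some "problem" || pvDget b "semantic_type" == some "solution" || pvDget b "semantic_type" == some "insight")) := by
  unfold pvBucketKey
  by_cases h : (pvDget b "semantic_type" == some "goal" || pvDget b "semantic_type" == some "problem" || pvDget b "semantic_type" == some "solution" || pvDget b "semantic_type" == some "insight") = true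
  · rw [if_pos h, h, Bool.not_true]
    cases ht : pvDget b "semantic_type" with
    | none => rw [ht] at h; exact Bool.noConfusion h
    | some s => rfl
  · rw [if_neg (by simp [h])]
    simp [h]

-- the two blocks sections agree
lemma pv_core_eq (blocks : List (List (String × String))) (parts : List String) :
    pvCoreA blocks parts = pvCoreB blocks parts := by
  unfold pvCoreA pvCoreB
  by_cases hb : blocks = []
  · simp [hb]
  · rw [if_pos hb, if_pos hb]
    simp only [pvSections, List.map_cons, List.map_nil, List.foldl_cons, List.foldl_nil]
    rw [pv_bucket_getD, pv_bucket_getD, pv_bucket_getD, pv_bucket_getD, pv_bucket_getD]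
    have hs0 : (PySem.Dict.ofList [((some "goal" : Option String), ([] : List (List (String × String)))), (some "problem", []), (some "solution", []), (some "insight", []), (none, [])]).getD (some "goal") [] = ([] : List (List (String × String))) := by rfl
    have hs1 : (PySem.Dict.ofList [((some "goal" : Option String), ([] : List (List (String × String)))), (some "problem", []), (some "solution", []), (some "insight", []), (none, [])]).getD (some "problem") [] = ([] : List (List (String × String))) := by rfl
    have hs2 : (PySem.Dict.ofList [((some "goal" : Option String), ([] : List (List (String × String)))), (some "problem", []), (some "solution", []), (some "insight", []), (none, [])]).getD (some "solution") [] = ([] : List (List (String × String))) := by rfl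
    have hs3 : (PySem.Dict.ofList [((some "goal" : Option String), ([] : List (List (String × String)))), (some "problem", []), (some "solution", []), (some "insight", []), (none, [])]).getD (some "insight") [] = ([] : List (List (String × String))) := by rfl
    have hs4 : (PySem.Dict.ofList [((some "goal" : Option String), ([] : List (List (String × String)))), (some "problem", []), (some "solution", []), (some "insight", []), (none, [])]).getD ((none : Option String)) [] = ([] : List (List (String × String))) := by rfl
    simp only [hs0, hs1, hs2, hs3, hs4, List.nil_append]
    simp only [pv_key_eq_some _ "goal" (Or.inl rfl),
      pv_key_eq_some _ "problem" (Or.inr (Or.inl rfl)),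
      pv_key_eq_some _ "solution" (Or.inr (Or.inr (Or.inl rfl))),
      pv_key_eq_some _ "insight" (Or.inr (Or.inr (Or.inr rfl))),
      pv_key_eq_none]
    rw [pv_emit_foldl, pv_emit_foldl, pv_emit_foldl, pv_emit_foldl, pv_emit_foldl]

-- ===== VERDICT (by name: the statement is the Claim_ definition above) =====
theorem compose_standard_narrative_py_spec : Claim_equal_compose_standard_narrative_py := by
  intro blocks context_items narrative_prompt _
  unfold Spec_compose_standard_narrative_py
  unfold compose_standard_narrative_py compose_standard_narrative_py_alt
  rw [pv_core_eq]
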